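-- pv_equiv track=rewrite | github.com/hldai/aspectex | rulemine.py | __find_phrase_word_idx_span
-- ===== SOURCE A (Python) =====
-- def __find_phrase_word_idx_span(phrase, sent_words):
--     phrase_words = phrase.split()
--     pleft = 0
--     while pleft + len(phrase_words) <= len(sent_words):
--         p = pleft
--         while p - pleft < len(phrase_words) and sent_words[p] == phrase_words[p - pleft]:
--             p += 1
--         if p - pleft == len(phrase_words):
--             return pleft, p
--         pleft += 1
--     return None
-- ===== SOURCE B (Python) =====
-- def __find_phrase_word_idx_span(phrase, sent_words):
--     phrase_words = phrase.split()
--     m = len(phrase_words)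
--     n = len(sent_words)
--     if m == 0:
--         return 0, 0
--     if m > n:
--         return None
--     MOD = 1000000007
--     BASE = 1000003
--
--     def whash(w):
--         h = 0
--         for ch in w:
--             h = (h * 257 + ord(ch)) % MOD
--         return h
--
--     txt = [whash(w) for w in sent_words]
--     hp = 0
--     for w in phrase_words:
--         hp = (hp * BASE + whash(w)) % MOD
--     ht = 0
--     for v in txt[:m]:
--         ht = (ht * BASE + v) % MOD
--     top = pow(BASE, m - 1, MOD)
--     for i in range(n - m + 1):
--         if ht == hp and sent_words[i:i + m] == phrase_words:
--             return i, i + m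
--         if i + m < n:
--             ht = ((ht - txt[i] * top) * BASE + txt[i + m]) % MOD
--     return None
-- ===== Notes on version B (the rewrite author's own statement) =====
-- stated objective: alternative
-- what changed: replaces the naive O(n*m) sliding word-by-word comparison with a Rabin-Karp search: per-word hashes plus a rolling polynomial window hash, verifying the actual words only on a hash hit
import Mathlib
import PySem

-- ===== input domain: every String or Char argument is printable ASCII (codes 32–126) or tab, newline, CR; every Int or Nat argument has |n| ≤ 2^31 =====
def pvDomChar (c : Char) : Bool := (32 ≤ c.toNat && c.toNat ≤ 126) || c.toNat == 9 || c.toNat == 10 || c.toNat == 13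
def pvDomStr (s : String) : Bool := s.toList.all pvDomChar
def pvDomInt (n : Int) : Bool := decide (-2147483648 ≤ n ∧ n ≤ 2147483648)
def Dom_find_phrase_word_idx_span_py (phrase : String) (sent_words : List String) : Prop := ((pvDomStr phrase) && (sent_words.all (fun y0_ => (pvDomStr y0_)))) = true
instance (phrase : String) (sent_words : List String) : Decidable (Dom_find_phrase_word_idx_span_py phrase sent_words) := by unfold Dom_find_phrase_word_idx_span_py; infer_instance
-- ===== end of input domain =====

-- B replaces A's naive word-by-word sliding comparison by a Rabin–Karp search (per-word hashes,
-- rolling polynomial window hash, words verified only on a hash hit); objective: alternative.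

-- ===== PORT A =====
-- inner while loop; j = p - pleft (Python's p is pleft + j).  sent_words[p] is always in range
-- here because the outer loop guarantees pleft + len(phrase_words) <= len(sent_words); the
-- option equality of pyGet? is therefore exact.
def pvAInner (sw pw : List String) (pleft j : Nat) : Nat :=
  if _h : j < pw.length ∧
      PySem.List.pyGet? sw ((pleft + j : Nat) : Int) = PySem.List.pyGet? pw ((j : Nat) : Int) then
    pvAInner sw pw pleft (j + 1)
  else pleft + j
termination_by pw.length - j

-- outer while loop over pleft
def pvAOuter (sw pw : List String) (pleft : Nat) : Option (Int × Int) :=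
  if _h : pleft + pw.length ≤ sw.length then
    let p := pvAInner sw pw pleft 0
    if p - pleft = pw.length then some ((pleft : Int), (p : Int))
    else pvAOuter sw pw (pleft + 1)
  else none
termination_by sw.length + 1 - pleft

def find_phrase_word_idx_span_py (phrase : String) (sent_words : List String) :
    Option (Int × Int) :=
  pvAOuter sent_words (PySem.Str.split₀ phrase) 0

-- ===== PORT B =====
-- whash(w): per-character polynomial hash mod 1000000007 (ord(ch) = code point = Char.toNat)
def pvWhash (w : String) : Int :=
  w.toList.foldl (fun h c => PySem.Int.mod (h * 257 + (c.toNat : Int)) 1000000007) 0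

-- one combining step of the word-level rolling hash: (h * BASE + v) % MOD
def pvStep (h v : Int) : Int := PySem.Int.mod (h * 1000003 + v) 1000000007

-- the scan loop 'for i in range(n - m + 1): …' with its early return; txt[i] and txt[i + m]
-- are read with getD, exact here because the loop guard and the 'i + m < n' test keep both in range
def pvBLoop (sw pw : List String) (txt : List Int) (hp top : Int) (n m : Nat)
    (i : Nat) (ht : Int) : Option (Int × Int) :=
  if _h : i < n - m + 1 then
    if ht = hp ∧
        PySem.List.slice sw (some ((i : Nat) : Int)) (some (((i : Nat) : Int) + ((m : Nat) : Int)))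
          = pw then
      some (((i : Nat) : Int), ((i : Nat) : Int) + ((m : Nat) : Int))
    else
      pvBLoop sw pw txt hp top n m (i + 1)
        (if i + m < n then
          PySem.Int.mod ((ht - txt.getD i 0 * top) * 1000003 + txt.getD (i + m) 0) 1000000007
        else ht)
  else none
termination_by n - m + 1 - i

def find_phrase_word_idx_span_py_alt (phrase : String) (sent_words : List String) :
    Option (Int × Int) :=
  let pw := PySem.Str.split₀ phrase
  let m := pw.length
  let n := sent_words.length
  if m = 0 then some (0, 0)
  else if n < m then none
  else
    let txt := sent_words.map pvWhash
    let hp := pw.foldl (fun h w => pvStep h (pvWhash w)) 0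
    -- txt[:m] with 0 ≤ m is take (PySem.List.slice_to_natCast)
    let ht := (txt.take m).foldl pvStep 0
    let top := PySem.Int.powMod 1000003 (m - 1) 1000000007   -- pow(BASE, m - 1, MOD)
    pvBLoop sent_words pw txt hp top n m 0 ht

-- ===== PRECONDITION & SPEC =====
def Spec_find_phrase_word_idx_span_py (phrase : String) (sent_words : List String) (out : Option (Int × Int)) : Prop := out = find_phrase_word_idx_span_py_alt phrase sent_words
instance (phrase : String) (sent_words : List String) (out : Option (Int × Int)) : Decidable (Spec_find_phrase_word_idx_span_py phrase sent_words out) := by unfold Spec_find_phrase_word_idx_span_py; infer_instance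

-- ===== CLAIM (what is proved, stated in full; the proofs are below) =====
def Claim_equal_find_phrase_word_idx_span_py : Prop := ∀ (phrase : String) (sent_words : List String), Dom_find_phrase_word_idx_span_py phrase sent_words → Spec_find_phrase_word_idx_span_py phrase sent_words (find_phrase_word_idx_span_py phrase sent_words)

-- ===== LEMMAS AND PROOFS =====

-- common reference: first pleft with a full slice match
def pvFirstMatch (sw pw : List String) (pleft : Nat) : Option (Int × Int) :=
  if _h : pleft + pw.length ≤ sw.length then
    if (sw.drop pleft).take pw.length = pw then
      some ((pleft : Int), (pleft : Int) + (pw.length : Int))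
    else pvFirstMatch sw pw (pleft + 1)
  else none
termination_by sw.length + 1 - pleft

lemma pvAInner_bounds (sw pw : List String) (pleft j : Nat) (hj : j ≤ pw.length) :
    pleft + j ≤ pvAInner sw pw pleft j ∧ pvAInner sw pw pleft j ≤ pleft + pw.length := by
  fun_induction pvAInner sw pw pleft j with
  | case1 j h ih => have := ih (by omega); omega
  | case2 j h => omega

lemma pvAInner_eq (sw pw : List String) (pleft : Nat)
    (hb : pleft + pw.length ≤ sw.length) (j : Nat) (hj : j ≤ pw.length) :
    (pvAInner sw pw pleft j = pleft + pw.length) ↔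
      ((sw.drop (pleft + j)).take (pw.length - j) = pw.drop j) := by
  fun_induction pvAInner sw pw pleft j with
  | case1 j h ih =>
    obtain ⟨hjlt, heq⟩ := h
    have hswlt : pleft + j < sw.length := by omega
    have hget : sw[pleft + j]'hswlt = pw[j]'hjlt := by
      rw [PySem.List.pyGet?_natCast, PySem.List.pyGet?_natCast] at heq
      simpa [List.getElem?_eq_getElem, hswlt, hjlt] using heq
    rw [ih (by omega)]
    have hdrop : sw.drop (pleft + j) = sw[pleft + j]'hswlt :: sw.drop (pleft + j + 1) := by
      exact (List.drop_eq_getElem_cons hswlt)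
    have hdrop2 : pw.drop j = pw[j]'hjlt :: pw.drop (j + 1) := by
      exact (List.drop_eq_getElem_cons hjlt)
    have hlen : pw.length - j = (pw.length - (j + 1)) + 1 := by omega
    constructor
    · intro hrest
      rw [hdrop, hdrop2, hlen, List.take_succ_cons, hget]
      have : pleft + (j + 1) = pleft + j + 1 := by omega
      rw [this] at hrest
      rw [hrest]
    · intro hall
      rw [hdrop, hdrop2, hlen, List.take_succ_cons] at hall
      have := (List.cons_eq_cons.mp hall).2
      have h3 : pleft + (j + 1) = pleft + j + 1 := by omega
      rw [h3]; exact this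
  | case2 j h =>
    rcases Nat.lt_or_ge j pw.length with hjlt | hjge
    · -- mismatch at j: both sides false
      have hswlt : pleft + j < sw.length := by omega
      have hne : sw[pleft + j]'hswlt ≠ pw[j]'hjlt := by
        intro hcontra
        apply h
        refine ⟨hjlt, ?_⟩
        rw [PySem.List.pyGet?_natCast, PySem.List.pyGet?_natCast]
        simp [hswlt, hjlt, hcontra]
      constructor
      · intro hcontra; omega
      · intro hall
        exfalso; apply hne
        have hdrop : sw.drop (pleft + j) = sw[pleft + j]'hswlt :: sw.drop (pleft + j + 1) :=
          List.drop_eq_getElem_cons hswlt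
        have hdrop2 : pw.drop j = pw[j]'hjlt :: pw.drop (j + 1) :=
          List.drop_eq_getElem_cons hjlt
        have hlen : pw.length - j = (pw.length - (j + 1)) + 1 := by omega
        rw [hdrop, hdrop2, hlen, List.take_succ_cons] at hall
        exact (List.cons_eq_cons.mp hall).1
    · -- j = pw.length
      have hj' : j = pw.length := by omega
      subst hj'
      simp

-- A equals the reference
lemma pvA_eq_first (sw pw : List String) (pleft : Nat) :
    pvAOuter sw pw pleft = pvFirstMatch sw pw pleft := by
  fun_induction pvAOuter sw pw pleft with
  | case1 pl h1 p hc =>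
    have hp : pvAInner sw pw pl 0 - pl = pw.length := hc
    have hb := pvAInner_bounds sw pw pl 0 (Nat.zero_le _)
    have hpE : pvAInner sw pw pl 0 = pl + pw.length := by omega
    have hmatch : (sw.drop pl).take pw.length = pw := by
      have := (pvAInner_eq sw pw pl h1 0 (Nat.zero_le _)).mp hpE
      simpa using this
    rw [pvFirstMatch, dif_pos h1, if_pos hmatch]
    have : (p : Nat) = pl + pw.length := hpE
    rw [this]
    push_cast
    rfl
  | case2 pl h1 p hc ih =>
    have hnm : ¬ (sw.drop pl).take pw.length = pw := by
      intro hmatch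
      apply hc
      have : pvAInner sw pw pl 0 = pl + pw.length := by
        apply (pvAInner_eq sw pw pl h1 0 (Nat.zero_le _)).mpr
        simpa using hmatch
      show pvAInner sw pw pl 0 - pl = pw.length
      omega
    rw [pvFirstMatch, dif_pos h1, if_neg hnm]
    exact ih
  | case3 pl h1 =>
    rw [pvFirstMatch, dif_neg h1]

-- ---- B side: algebra of the rolling polynomial hash ----

-- pure (un-modded) polynomial accumulation
def pvP (h : Int) (l : List Int) : Int := l.foldl (fun a v => a * 1000003 + v) h

lemma pvmod_eq (x : Int) : PySem.Int.mod x 1000000007 = x % 1000000007 :=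
  PySem.Int.mod_eq_emod_of_pos (by norm_num)

-- one modded step absorbs a pre-reduced accumulator
lemma pvStep_mod (h v : Int) :
    pvStep (PySem.Int.mod h 1000000007) v = PySem.Int.mod (h * 1000003 + v) 1000000007 := by
  unfold pvStep
  rw [pvmod_eq, pvmod_eq, pvmod_eq]
  have hm1 : Int.ModEq 1000000007 (h % 1000000007) h := Int.emod_emod_of_dvd h dvd_rfl
  exact (hm1.mul_right 1000003).add_right v

-- the modded fold is the pure fold reduced once
lemma pvFold_eq_mod (l : List Int) (h : Int) :
    l.foldl pvStep (PySem.Int.mod h 1000000007) = PySem.Int.mod (pvP h l) 1000000007 := by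
  induction l generalizing h with
  | nil => simp [pvP]
  | cons v t ih =>
    rw [List.foldl_cons, pvStep_mod, ih]
    rfl

lemma pvP_init (l : List Int) (h : Int) : pvP h l = h * 1000003 ^ l.length + pvP 0 l := by
  induction l generalizing h with
  | nil => simp [pvP]
  | cons v t ih =>
    show pvP (h * 1000003 + v) t = _
    rw [ih (h * 1000003 + v)]
    have : pvP 0 (v :: t) = pvP (0 * 1000003 + v) t := rfl
    rw [this, ih (0 * 1000003 + v)]
    simp only [List.length_cons, pow_succ]
    ring

lemma pvP_append (l : List Int) (h v : Int) : pvP h (l ++ [v]) = pvP h l * 1000003 + v := by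
  unfold pvP
  rw [List.foldl_append]
  rfl

-- the Rabin–Karp window-shift identity, mod 1000000007
lemma pvRoll (a v ht : Int) (t : List Int)
    (hht : ht = PySem.Int.mod (pvP 0 (a :: t)) 1000000007) :
    PySem.Int.mod
        ((ht - a * PySem.Int.mod (1000003 ^ t.length) 1000000007) * 1000003 + v) 1000000007
      = PySem.Int.mod (pvP 0 (t ++ [v])) 1000000007 := by
  have hsplit : pvP 0 (a :: t) = a * 1000003 ^ t.length + pvP 0 t := by
    have : pvP 0 (a :: t) = pvP (0 * 1000003 + a) t := rfl
    rw [this, pvP_init t (0 * 1000003 + a)]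
    ring
  simp only [pvmod_eq] at hht ⊢
  rw [pvP_append]
  have h1 : ht ≡ a * 1000003 ^ t.length + pvP 0 t [ZMOD 1000000007] := by
    rw [hht, hsplit]
    exact Int.emod_emod_of_dvd _ dvd_rfl
  have h2 : Int.ModEq 1000000007 (1000003 ^ t.length % 1000000007) (1000003 ^ t.length) :=
    Int.emod_emod_of_dvd _ dvd_rfl
  have h3 : ht - a * (1000003 ^ t.length % 1000000007) ≡ pvP 0 t
      [ZMOD 1000000007] := by
    have := h1.sub (h2.mul_left a)
    have heq : a * 1000003 ^ t.length + pvP 0 t - a * 1000003 ^ t.length = pvP 0 t := by ring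
    rwa [heq] at this
  exact (h3.mul_right 1000003).add_right v

-- window cons/snoc decomposition used by the shift
lemma pvWindow_cons (txt : List Int) (i m : Nat) (hm : 1 ≤ m) (h : i + m ≤ txt.length) :
    (txt.drop i).take m = txt[i]'(by omega) :: ((txt.drop (i + 1)).take (m - 1)) := by
  obtain ⟨m', rfl⟩ : ∃ m', m = m' + 1 := ⟨m - 1, by omega⟩
  rw [List.drop_eq_getElem_cons (by omega : i < txt.length), List.take_succ_cons]
  simp

lemma pvWindow_snoc (txt : List Int) (i m : Nat) (hm : 1 ≤ m) (h : i + m < txt.length) :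
    (txt.drop (i + 1)).take m
      = ((txt.drop (i + 1)).take (m - 1)) ++ [txt[i + m]'(by omega)] := by
  obtain ⟨m', rfl⟩ : ∃ m', m = m' + 1 := ⟨m - 1, by omega⟩
  rw [List.take_add_one]
  have hg : (txt.drop (i + 1))[m']? = some (txt[i + (m' + 1)]'(by omega)) := by
    rw [List.getElem?_drop]
    have : i + 1 + m' = i + (m' + 1) := by omega
    rw [this, List.getElem?_eq_getElem (by omega)]
  simp [hg]

-- the scan loop computes the first full match, given the rolling-hash invariant
lemma pvBLoop_eq (sw pw : List String)
    (hm : 0 < pw.length) (hmn : pw.length ≤ sw.length) :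
    ∀ (k i : Nat) (ht : Int), sw.length - pw.length + 1 - i = k →
      i ≤ sw.length - pw.length →
      ht = PySem.Int.mod (pvP 0 (((sw.map pvWhash).drop i).take pw.length)) 1000000007 →
      pvBLoop sw pw (sw.map pvWhash)
          (PySem.Int.mod (pvP 0 (pw.map pvWhash)) 1000000007)
          (PySem.Int.mod (1000003 ^ (pw.length - 1)) 1000000007)
          sw.length pw.length i ht
        = pvFirstMatch sw pw i := by
  intro k
  induction k with
  | zero => intro i ht hk hi hht; omega
  | succ k ih =>
    intro i ht hk hi hht
    have hguard : i < sw.length - pw.length + 1 := by omega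
    have hbound : i + pw.length ≤ sw.length := by omega
    rw [pvBLoop, dif_pos hguard]
    rw [pvFirstMatch, dif_pos hbound]
    have hslice : PySem.List.slice sw (some ((i : Nat) : Int))
        (some (((i : Nat) : Int) + ((pw.length : Nat) : Int)))
        = (sw.drop i).take pw.length := PySem.List.slice_natCast_add sw i pw.length
    by_cases hmatch : (sw.drop i).take pw.length = pw
    · -- real match: the hash agrees automatically, the branch fires
      have hwin : ((sw.map pvWhash).drop i).take pw.length = pw.map pvWhash := by
        rw [← List.map_drop, ← List.map_take, hmatch]
      rw [if_pos ⟨by rw [hht, hwin], by rw [hslice, hmatch]⟩, if_pos hmatch]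
    · rw [if_neg (by rw [hslice]; tauto), if_neg hmatch]
      by_cases hnext : i + pw.length < sw.length
      · -- shift the window and recurse
        have hi' : i + 1 ≤ sw.length - pw.length := by omega
        set txt := sw.map pvWhash with htxt
        have hlen : txt.length = sw.length := by simp [htxt]
        have hlt : ((txt.drop (i + 1)).take (pw.length - 1)).length = pw.length - 1 := by
          simp [hlen]
          omega
        have hcons := pvWindow_cons txt i pw.length hm (by omega)
        have hsnoc := pvWindow_snoc txt i pw.length hm (by omega)
        have hupdate :
            PySem.Int.mod ((ht - txt.getD i 0 *
                PySem.Int.mod (1000003 ^ (pw.length - 1)) 1000000007) * 1000003 +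
              txt.getD (i + pw.length) 0) 1000000007
            = PySem.Int.mod (pvP 0 ((txt.drop (i + 1)).take pw.length)) 1000000007 := by
          rw [List.getD_eq_getElem txt 0 (by omega : i < txt.length),
            List.getD_eq_getElem txt 0 (by omega : i + pw.length < txt.length), hsnoc]
          have := pvRoll (txt[i]'(by omega)) (txt[i + pw.length]'(by omega)) ht
            ((txt.drop (i + 1)).take (pw.length - 1)) (by rw [hht, hcons])
          rwa [hlt] at this
        rw [if_pos hnext]
        exact ih (i + 1) _ (by omega) hi' hupdate
      · -- i is the last candidate: both sides run out
        have hlast : ¬ (i + 1 < sw.length - pw.length + 1) := by omega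
        rw [if_neg hnext, pvBLoop, dif_neg hlast,
          pvFirstMatch, dif_neg (by omega : ¬ (i + 1 + pw.length ≤ sw.length))]


-- B equals the reference
lemma pvB_eq_first (phrase : String) (sw : List String) :
    find_phrase_word_idx_span_py_alt phrase sw =
      pvFirstMatch sw (PySem.Str.split₀ phrase) 0 := by
  unfold find_phrase_word_idx_span_py_alt
  set pw := PySem.Str.split₀ phrase with hpw
  by_cases hm : pw.length = 0
  · rw [if_pos hm]
    rw [pvFirstMatch, dif_pos (by omega), if_pos (by rw [List.length_eq_zero_iff.mp hm]; simp)]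
    simp [hm]
  · rw [if_neg hm]
    by_cases hn : sw.length < pw.length
    · rw [if_pos hn, pvFirstMatch, dif_neg (by omega)]
    · rw [if_neg hn]
      have hmod0 : PySem.Int.mod 0 1000000007 = 0 := by rw [pvmod_eq]; simp
      have hhp : pw.foldl (fun h w => pvStep h (pvWhash w)) 0
          = PySem.Int.mod (pvP 0 (pw.map pvWhash)) 1000000007 := by
        rw [← List.foldl_map]
        conv_lhs => rw [← hmod0]
        exact pvFold_eq_mod _ 0
      have hht : ((sw.map pvWhash).take pw.length).foldl pvStep 0
          = PySem.Int.mod (pvP 0 (((sw.map pvWhash).drop 0).take pw.length)) 1000000007 := by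
        rw [List.drop_zero]
        conv_lhs => rw [← hmod0]
        exact pvFold_eq_mod _ 0
      have htop : PySem.Int.powMod 1000003 (pw.length - 1) 1000000007
          = PySem.Int.mod (1000003 ^ (pw.length - 1)) 1000000007 :=
        PySem.Int.powMod_eq 1000003 (pw.length - 1) 1000000007
      show pvBLoop sw pw (sw.map pvWhash)
          (pw.foldl (fun h w => pvStep h (pvWhash w)) 0)
          (PySem.Int.powMod 1000003 (pw.length - 1) 1000000007)
          sw.length pw.length 0 (((sw.map pvWhash).take pw.length).foldl pvStep 0)
        = pvFirstMatch sw pw 0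
      rw [hhp, hht, htop]
      exact pvBLoop_eq sw pw (by omega) (by omega) _ 0 _ rfl (by omega) rfl

-- ===== VERDICT (by name: the statement is the Claim_ definition above) =====
theorem find_phrase_word_idx_span_py_spec : Claim_equal_find_phrase_word_idx_span_py := by
  intro phrase sent_words _
  unfold Spec_find_phrase_word_idx_span_py
  rw [pvB_eq_first]
  unfold find_phrase_word_idx_span_py
  exact pvA_eq_first _ _ _
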